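-- pv_equiv track=rewrite | github.com/Vani-lla/game-of-life | cpu_support.py | full_surroundings
-- ===== SOURCE A (Python) =====
-- def full_surroundings(ind_x, ind_y, size, ind_correction):
--     """
--        Returns indexes of all surrounding cells
--     """
--     cells = []
--     for y in range(-1, 2):
--         for x in range(-1, 2):
--             xi, yi = ind_x + x, ind_y + y + ind_correction
--
--             if xi < size[1] and xi >= 0 and yi < size[0] and yi >= 0:
--                 cells.append((xi, yi))
--
--     return cells
-- ===== SOURCE B (Python) =====
-- def full_surroundings(ind_x, ind_y, size, ind_correction):
--     """
--        Returns indexes of all surrounding cells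
--     """
--     yc = ind_y + ind_correction
--     x_lo, x_hi = max(0, ind_x - 1), min(size[1], ind_x + 2)
--     y_lo, y_hi = max(0, yc - 1), min(size[0], yc + 2)
--     w, h = x_hi - x_lo, y_hi - y_lo
--     if w <= 0 or h <= 0:
--         return []
--     return [(x_lo + i % w, y_lo + i // w) for i in range(w * h)]
-- ===== Notes on version B (the rewrite author's own statement) =====
-- stated objective: alternative
-- what changed: B computes the clamped bounding box once and emits its cells from a single flat loop over the linear index i in range(w*h), recovering each cell as (x_lo + i % w, y_lo + i // w) by divmod, instead of A's nested 3x3 offset scan with a four-way bounds test per cell.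
import Mathlib
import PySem

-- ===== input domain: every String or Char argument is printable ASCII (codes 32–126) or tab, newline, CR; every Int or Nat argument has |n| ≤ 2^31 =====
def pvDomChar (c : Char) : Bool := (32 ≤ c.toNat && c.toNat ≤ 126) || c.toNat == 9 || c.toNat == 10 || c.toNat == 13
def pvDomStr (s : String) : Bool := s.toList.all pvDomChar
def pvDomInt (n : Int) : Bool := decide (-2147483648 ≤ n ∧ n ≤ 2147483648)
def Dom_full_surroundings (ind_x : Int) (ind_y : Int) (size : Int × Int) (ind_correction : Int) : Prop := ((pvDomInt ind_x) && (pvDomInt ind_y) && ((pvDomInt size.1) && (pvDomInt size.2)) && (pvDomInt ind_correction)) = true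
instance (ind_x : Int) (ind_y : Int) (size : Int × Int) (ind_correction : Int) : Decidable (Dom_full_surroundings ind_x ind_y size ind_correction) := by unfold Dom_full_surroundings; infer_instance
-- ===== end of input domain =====

-- B replaces A's nested 3×3 offset scan with per-cell bounds checks by one flat
-- loop over the linear index of the clamped bounding box, recovering each cell
-- by divmod; objective: alternative (different decomposition, same cost).

-- ===== PORT A =====
def full_surroundings (ind_x : Int) (ind_y : Int) (size : Int × Int) (ind_correction : Int) : List (Int × Int) :=
  (PySem.List.pyRange (-1) 2 1).foldl (fun cells y =>
    (PySem.List.pyRange (-1) 2 1).foldl (fun cells x =>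
      if ind_x + x < size.2 ∧ ind_x + x ≥ 0 ∧
         ind_y + y + ind_correction < size.1 ∧ ind_y + y + ind_correction ≥ 0 then
        cells ++ [(ind_x + x, ind_y + y + ind_correction)]
      else cells) cells) []

-- ===== PORT B =====
def full_surroundings_alt (ind_x : Int) (ind_y : Int) (size : Int × Int) (ind_correction : Int) : List (Int × Int) :=
  let yc := ind_y + ind_correction
  let x_lo := max 0 (ind_x - 1)
  let x_hi := min size.2 (ind_x + 2)
  let y_lo := max 0 (yc - 1)
  let y_hi := min size.1 (yc + 2)
  let w := x_hi - x_lo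
  let h := y_hi - y_lo
  if w ≤ 0 ∨ h ≤ 0 then []
  else (PySem.List.pyRange 0 (w * h) 1).map
    (fun i => (x_lo + PySem.Int.mod i w, y_lo + PySem.Int.floordiv i w))

-- ===== PRECONDITION & SPEC =====
def Spec_full_surroundings (ind_x : Int) (ind_y : Int) (size : Int × Int) (ind_correction : Int) (out : List (Int × Int)) : Prop := out = full_surroundings_alt ind_x ind_y size ind_correction
instance (ind_x : Int) (ind_y : Int) (size : Int × Int) (ind_correction : Int) (out : List (Int × Int)) : Decidable (Spec_full_surroundings ind_x ind_y size ind_correction out) := by unfold Spec_full_surroundings; infer_instance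

-- ===== CLAIM (what is proved, stated in full; the proofs are below) =====
def Claim_equal_full_surroundings : Prop := ∀ (ind_x : Int) (ind_y : Int) (size : Int × Int) (ind_correction : Int), Dom_full_surroundings ind_x ind_y size ind_correction → Spec_full_surroundings ind_x ind_y size ind_correction (full_surroundings ind_x ind_y size ind_correction)

-- ===== LEMMAS AND PROOFS =====

-- row-major (y major, x minor) strict order on cell indexes
def pvLex (p q : Int × Int) : Prop := p.2 < q.2 ∨ (p.2 = q.2 ∧ p.1 < q.1)

-- 'if cond: out.append(f x)' fold = filter-then-map (Prop-test version)
lemma pv_foldl_append_if {α β : Type} (p : α → Prop) [DecidablePred p] (f : α → β)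
    (l : List α) (acc : List β) :
    l.foldl (fun acc x => if p x then acc ++ [f x] else acc) acc
      = acc ++ (l.filter (fun x => decide (p x))).map f := by
  induction l generalizing acc with
  | nil => simp
  | cons a t ih =>
    simp only [List.foldl_cons, List.filter_cons]
    by_cases h : p a <;> simp [h, ih]

-- two strictly row-major-sorted cell lists with the same members are equal
lemma pv_eq_of_pairwise (l₁ l₂ : List (Int × Int)) (h₁ : List.Pairwise pvLex l₁)
    (h₂ : List.Pairwise pvLex l₂) (hm : ∀ p, p ∈ l₁ ↔ p ∈ l₂) : l₁ = l₂ := by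
  have anti : ∀ a b : Int × Int, a ∈ l₁ → b ∈ l₂ → pvLex a b → pvLex b a → a = b := by
    rintro ⟨a1, a2⟩ ⟨b1, b2⟩ _ _ hab hba
    simp only [pvLex] at hab hba
    simp only [Prod.mk.injEq]
    omega
  have hne : ∀ {a b : Int × Int}, pvLex a b → a ≠ b := by
    rintro ⟨a1, a2⟩ ⟨b1, b2⟩ h heq
    simp only [pvLex] at h
    simp only [Prod.mk.injEq] at heq
    omega
  exact List.Perm.eq_of_pairwise anti h₁ h₂
    ((List.perm_ext_iff_of_nodup (h₁.imp hne) (h₂.imp hne)).mpr hm)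

lemma pv_flatMap_pairwise (g : Int → List (Int × Int)) (k : Int → Int) (l : List Int)
    (hin : ∀ y ∈ l, List.Pairwise pvLex (g y))
    (hsnd : ∀ y, ∀ p ∈ g y, p.2 = k y)
    (hk : List.Pairwise (fun a b => k a < k b) l) :
    List.Pairwise pvLex (l.flatMap g) := by
  rw [List.pairwise_flatMap]
  refine ⟨hin, hk.imp ?_⟩
  intro a b hab p hp q hq
  exact Or.inl (by rw [hsnd a p hp, hsnd b q hq]; exact hab)

-- B's flat divmod enumeration is strictly row-major sorted (0 < w)
lemma pv_divmod_pairwise (x_lo y_lo w n : Int) (hw : 0 < w) :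
    List.Pairwise pvLex ((PySem.List.pyRange 0 n 1).map
      (fun i => (x_lo + i % w, y_lo + i / w))) := by
  rw [List.pairwise_map]
  refine (PySem.List.pairwise_lt_pyRange_one 0 n).imp ?_
  intro i j hij
  have hq : i / w ≤ j / w := Int.ediv_le_ediv hw (le_of_lt hij)
  rcases lt_or_eq_of_le hq with h | h
  · exact Or.inl (by dsimp only; omega)
  · have hi := Int.mul_ediv_add_emod i w
    have hj := Int.mul_ediv_add_emod j w
    rw [h] at hi
    exact Or.inr ⟨by dsimp only; omega, by dsimp only; omega⟩

theorem full_surroundings_spec_aux (ind_x ind_y : Int) (size : Int × Int)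
    (ind_correction : Int) :
    full_surroundings ind_x ind_y size ind_correction
      = full_surroundings_alt ind_x ind_y size ind_correction := by
  have hr3 : PySem.List.pyRange (-1) 2 1 = [-1, 0, 1] := by decide
  have hA : full_surroundings ind_x ind_y size ind_correction
      = ([-1, 0, 1] : List Int).flatMap (fun y =>
          (([-1, 0, 1] : List Int).filter (fun x =>
            decide (ind_x + x < size.2 ∧ ind_x + x ≥ 0 ∧
              ind_y + y + ind_correction < size.1 ∧ ind_y + y + ind_correction ≥ 0))).map
            (fun x => (ind_x + x, ind_y + y + ind_correction))) := by
    unfold full_surroundings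
    rw [hr3]
    have hstep : (fun (cells : List (Int × Int)) (y : Int) =>
        ([-1, 0, 1] : List Int).foldl (fun cells x =>
          if ind_x + x < size.2 ∧ ind_x + x ≥ 0 ∧
             ind_y + y + ind_correction < size.1 ∧ ind_y + y + ind_correction ≥ 0 then
            cells ++ [(ind_x + x, ind_y + y + ind_correction)]
          else cells) cells)
        = (fun cells y => cells ++
            (([-1, 0, 1] : List Int).filter (fun x =>
              decide (ind_x + x < size.2 ∧ ind_x + x ≥ 0 ∧
                ind_y + y + ind_correction < size.1 ∧ ind_y + y + ind_correction ≥ 0))).map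
              (fun x => (ind_x + x, ind_y + y + ind_correction))) := by
      funext cells y
      exact pv_foldl_append_if _ _ _ _
    rw [hstep, PySem.List.foldl_append_eq_flatMap]
    simp
  -- shorthands for the box bounds
  set x_lo := max 0 (ind_x - 1) with hxlo
  set x_hi := min size.2 (ind_x + 2) with hxhi
  set y_lo := max 0 (ind_y + ind_correction - 1) with hylo
  set y_hi := min size.1 (ind_y + ind_correction + 2) with hyhi
  -- membership in A's list ↔ the point lies in the clamped box
  have h3 : List.Pairwise (· < ·) ([-1, 0, 1] : List Int) := by decide
  have hApair : List.Pairwise pvLex (full_surroundings ind_x ind_y size ind_correction) := by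
    rw [hA]
    refine pv_flatMap_pairwise _ (fun y => ind_y + y + ind_correction) _ ?_ ?_ ?_
    · intro y _
      rw [List.pairwise_map]
      refine List.Pairwise.imp ?_ (List.Pairwise.filter _ h3)
      intro a b h
      exact Or.inr ⟨rfl, by omega⟩
    · intro y p hp
      simp only [List.mem_map] at hp
      obtain ⟨x, _, rfl⟩ := hp
      rfl
    · exact h3.imp (by intro a b h; dsimp only; omega)
  have hAmem : ∀ p : Int × Int, p ∈ full_surroundings ind_x ind_y size ind_correction ↔
      (x_lo ≤ p.1 ∧ p.1 < x_hi ∧ y_lo ≤ p.2 ∧ p.2 < y_hi) := by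
    rintro ⟨px, py⟩
    rw [hA]
    simp only [List.mem_flatMap, List.mem_map, List.mem_filter, List.mem_cons,
      List.not_mem_nil, or_false, decide_eq_true_eq, Prod.mk.injEq, hxlo, hxhi, hylo, hyhi]
    constructor
    · rintro ⟨y, hy, x, ⟨hx, h1, h2, h3', h4⟩, rfl, rfl⟩
      rcases hy with rfl | rfl | rfl <;> rcases hx with rfl | rfl | rfl <;>
        exact ⟨by omega, by omega, by omega, by omega⟩
    · rintro ⟨hb1, hb2, hb3, hb4⟩
      refine ⟨py - ind_y - ind_correction, ?_, px - ind_x, ⟨?_, by omega, by omega, by omega, by omega⟩, by ring, by ring⟩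
      · have : py - ind_y - ind_correction = -1 ∨ py - ind_y - ind_correction = 0 ∨
            py - ind_y - ind_correction = 1 := by omega
        simpa using this
      · have : px - ind_x = -1 ∨ px - ind_x = 0 ∨ px - ind_x = 1 := by omega
        simpa using this
  unfold full_surroundings_alt
  simp only [← hxlo, ← hxhi, ← hylo, ← hyhi]
  by_cases hdeg : x_hi - x_lo ≤ 0 ∨ y_hi - y_lo ≤ 0
  · rw [if_pos hdeg]
    rcases List.eq_nil_or_concat (full_surroundings ind_x ind_y size ind_correction) with h | ⟨l, p, h⟩
    · exact h
    · exfalso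
      have hp : p ∈ full_surroundings ind_x ind_y size ind_correction := by
        rw [h]; simp
      rw [hAmem] at hp
      omega
  · rw [if_neg hdeg]
    push Not at hdeg
    obtain ⟨hw, hh⟩ := hdeg
    set w := x_hi - x_lo with hwdef
    set h := y_hi - y_lo with hhdef
    have hw0 : 0 < w := by omega
    have hfun : (fun i => (x_lo + PySem.Int.mod i w, y_lo + PySem.Int.floordiv i w))
        = (fun i : Int => (x_lo + i % w, y_lo + i / w)) := by
      funext i
      rw [PySem.Int.mod_eq_emod_of_pos hw0, PySem.Int.floordiv_eq_ediv_of_pos hw0]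
    rw [hfun]
    refine pv_eq_of_pairwise _ _ hApair (pv_divmod_pairwise x_lo y_lo w (w * h) hw0) ?_
    rintro ⟨px, py⟩
    rw [hAmem]
    simp only [List.mem_map, PySem.List.mem_pyRange_one, Prod.mk.injEq]
    constructor
    · rintro ⟨hb1, hb2, hb3, hb4⟩
      have hdiv : ((py - y_lo) * w + (px - x_lo)) / w = py - y_lo := by
        rw [add_comm ((py - y_lo) * w) (px - x_lo),
          Int.add_mul_ediv_right _ _ (ne_of_gt hw0),
          Int.ediv_eq_zero_of_lt (by omega) (by omega)]
        ring
      have hmod : ((py - y_lo) * w + (px - x_lo)) % w = px - x_lo := by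
        have hde := Int.mul_ediv_add_emod ((py - y_lo) * w + (px - x_lo)) w
        rw [hdiv] at hde
        have hmw : w * (py - y_lo) = (py - y_lo) * w := mul_comm _ _
        omega
      refine ⟨(py - y_lo) * w + (px - x_lo), ⟨by have := mul_nonneg (by omega : (0:ℤ) ≤ py - y_lo) (le_of_lt hw0); omega, ?_⟩, ?_, ?_⟩
      · have h1 : (py - y_lo) * w ≤ (h - 1) * w :=
          mul_le_mul_of_nonneg_right (by omega) (le_of_lt hw0)
        have h2 : (h - 1) * w + (px - x_lo) < h * w := by nlinarith
        calc (py - y_lo) * w + (px - x_lo) ≤ (h - 1) * w + (px - x_lo) := by omega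
          _ < h * w := h2
          _ = w * h := mul_comm h w
      · rw [hmod]; ring
      · rw [hdiv]; ring
    · rintro ⟨i, ⟨hi0, hin⟩, rfl, rfl⟩
      have hm0 : 0 ≤ i % w := Int.emod_nonneg i (ne_of_gt hw0)
      have hm1 : i % w < w := Int.emod_lt_of_pos i hw0
      have hq0 : 0 ≤ i / w := Int.ediv_nonneg hi0 (le_of_lt hw0)
      have hq1 : i / w < h := by
        rw [Int.ediv_lt_iff_lt_mul hw0]
        have := mul_comm w h
        omega
      exact ⟨by omega, by omega, by omega, by omega⟩

-- ===== VERDICT (by name: the statement is the Claim_ definition above) =====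
theorem full_surroundings_spec : Claim_equal_full_surroundings := by
  intro ind_x ind_y size ind_correction _
  unfold Spec_full_surroundings
  exact full_surroundings_spec_aux ind_x ind_y size ind_correction
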